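-- pv_equiv track=rewrite | github.com/Basilsabu10/Autoclaim-V3 | Autoclaim-V3/autoclaim_project/server/app/services/yolo11_seg_service.py | _build_damage_part_mapping_for_price_api
-- ===== SOURCE A (Python) =====
-- from typing import Dict, Any, List, Optional
--
-- _DAMAGE_SEVERITY_ORDER = {
--     "missing": 5,
--     "crush":   4,
--     "broken":  4,
--     "crack":   3,
--     "tear":    3,
--     "deform":  3,
--     "dent":    2,
--     "scratch": 1,
-- }
--
-- def _build_damage_part_mapping_for_price_api(
--     damage_part_mapping: List[Dict],
-- ) -> List[Dict]:
--
--     seen: Dict[str, str] = {}  # panel_key → damage_type (worst so far)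
--     for m in damage_part_mapping:
--         key = m.get("panel_key")
--         dt  = m.get("damage_type", "scratch").lower().strip()
--         if not key or key == "body_panel":
--             continue
--         existing_sev = _DAMAGE_SEVERITY_ORDER.get(seen.get(key, ""), 0)
--         new_sev      = _DAMAGE_SEVERITY_ORDER.get(dt, 0)
--         if key not in seen or new_sev > existing_sev:
--             seen[key] = dt
--     return [{"part_key": k, "damage_type": v} for k, v in seen.items()]
-- ===== SOURCE B (Python) =====
-- from typing import Dict, List
--
-- _DAMAGE_SEVERITY_ORDER = {
--     "missing": 5,
--     "crush":   4,
--     "broken":  4,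
--     "crack":   3,
--     "tear":    3,
--     "deform":  3,
--     "dent":    2,
--     "scratch": 1,
-- }
--
--
-- def _build_damage_part_mapping_for_price_api(
--     damage_part_mapping: List[Dict],
-- ) -> List[Dict]:
--     # First pass: group every normalized damage type under its panel key.
--     groups: Dict[str, List[str]] = {}
--     for m in damage_part_mapping:
--         key = m.get("panel_key")
--         if not key or key == "body_panel":
--             continue
--         dt = m.get("damage_type", "scratch").lower().strip()
--         groups.setdefault(key, []).append(dt)
--     # Second pass: the worst damage per key is the first maximal-severity entry.
--     return [
--         {"part_key": k,
--          "damage_type": max(dts,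
--                             key=lambda d: _DAMAGE_SEVERITY_ORDER.get(d, 0),
--                             default="scratch")}
--         for k, dts in groups.items()
--     ]
-- ===== Notes on version B (the rewrite author's own statement) =====
-- stated objective: alternative
-- what changed: B replaces A's single-pass running-best dict (compare severity on every hit, overwrite on strict improvement) with a two-phase group-then-reduce: first group all normalized damage types per panel key, then pick each group's first maximal-severity entry with max(..., key=...).
import Mathlib
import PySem

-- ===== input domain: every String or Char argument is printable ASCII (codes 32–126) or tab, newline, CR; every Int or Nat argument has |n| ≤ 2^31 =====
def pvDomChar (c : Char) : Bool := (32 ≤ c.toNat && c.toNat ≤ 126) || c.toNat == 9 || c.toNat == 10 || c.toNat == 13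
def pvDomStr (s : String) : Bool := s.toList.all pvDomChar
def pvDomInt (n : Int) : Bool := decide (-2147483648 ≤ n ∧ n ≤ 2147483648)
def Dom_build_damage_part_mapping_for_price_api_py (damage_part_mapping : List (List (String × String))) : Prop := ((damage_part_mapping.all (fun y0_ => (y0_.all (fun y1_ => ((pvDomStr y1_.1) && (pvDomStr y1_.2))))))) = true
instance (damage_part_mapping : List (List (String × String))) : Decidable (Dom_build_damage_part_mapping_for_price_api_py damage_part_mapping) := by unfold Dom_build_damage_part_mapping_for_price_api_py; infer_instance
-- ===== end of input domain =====

-- B replaces A's running-best dict with a group-then-reduce decomposition (group damage types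
-- per panel key, then take the first maximal-severity one per group); alternative, not faster.

-- module constant _DAMAGE_SEVERITY_ORDER (shared by both Python versions)
def damageSeverityOrder : PySem.Dict String Int :=
  PySem.Dict.ofList
    [("missing", 5), ("crush", 4), ("broken", 4), ("crack", 3),
     ("tear", 3), ("deform", 3), ("dent", 2), ("scratch", 1)]

-- ===== PORT A =====
-- loop body of A: fold one mapping m into `seen` (panel_key → worst damage so far)
def stepA (seen : PySem.Dict String String) (m : List (String × String)) : PySem.Dict String String :=
  let keyOpt := m.lookup "panel_key"
  let dt := PySem.Str.strip (PySem.Str.lower ((m.lookup "damage_type").getD "scratch"))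
  match keyOpt with
  | none => seen
  | some key =>
    if key = "" ∨ key = "body_panel" then seen
    else
      let existing_sev := damageSeverityOrder.getD (seen.getD key "") 0
      let new_sev := damageSeverityOrder.getD dt 0
      if seen.contains key = false ∨ new_sev > existing_sev then seen.insert key dt else seen

def build_damage_part_mapping_for_price_api_py (damage_part_mapping : List (List (String × String))) : List (List (String × String)) :=
  (damage_part_mapping.foldl stepA PySem.Dict.empty).items.map
    (fun kv => [("part_key", kv.1), ("damage_type", kv.2)])

-- ===== PORT B =====
-- loop body of B's first pass: append the normalized damage type to its key's group
def stepB (groups : PySem.Dict String (List String)) (m : List (String × String)) : PySem.Dict String (List String) :=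
  match m.lookup "panel_key" with
  | none => groups
  | some key =>
    if key = "" ∨ key = "body_panel" then groups
    else
      let dt := PySem.Str.strip (PySem.Str.lower ((m.lookup "damage_type").getD "scratch"))
      groups.modify key [] (· ++ [dt])

def build_damage_part_mapping_for_price_api_py_alt (damage_part_mapping : List (List (String × String))) : List (List (String × String)) :=
  (damage_part_mapping.foldl stepB PySem.Dict.empty).items.map
    (fun kg => [("part_key", kg.1),
                ("damage_type", PySem.List.maxD kg.2 (fun d => damageSeverityOrder.getD d 0) "scratch")])

-- ===== PRECONDITION & SPEC =====
def Spec_build_damage_part_mapping_for_price_api_py (damage_part_mapping : List (List (String × String))) (out : List (List (String × String))) : Prop := out = build_damage_part_mapping_for_price_api_py_alt damage_part_mapping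
instance (damage_part_mapping : List (List (String × String))) (out : List (List (String × String))) : Decidable (Spec_build_damage_part_mapping_for_price_api_py damage_part_mapping out) := by unfold Spec_build_damage_part_mapping_for_price_api_py; infer_instance

-- ===== CLAIM (what is proved, stated in full; the proofs are below) =====
def Claim_equal_build_damage_part_mapping_for_price_api_py : Prop := ∀ (damage_part_mapping : List (List (String × String))), Dom_build_damage_part_mapping_for_price_api_py damage_part_mapping → Spec_build_damage_part_mapping_for_price_api_py damage_part_mapping (build_damage_part_mapping_for_price_api_py damage_part_mapping)

-- ===== LEMMAS AND PROOFS =====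

-- severity of a damage-type string
def sev (d : String) : Int := damageSeverityOrder.getD d 0

-- B's per-group reduction: first maximal-severity entry ("scratch" on the empty group)
def wmax (g : List String) : String := PySem.List.maxD g sev "scratch"

-- items-level simulation: one A-entry corresponds to a B-group
def Fw : String × List String → String × String := fun p => (p.1, wmax p.2)

lemma max?_eq_some_wmax (g : List String) (h : g ≠ []) :
    PySem.List.max? g sev = some (wmax g) := by
  cases hm : PySem.List.max? g sev with
  | none => exact absurd ((PySem.List.max?_eq_none_iff g sev).mp hm) h
  | some m => simp [wmax, PySem.List.maxD, hm]

lemma wmax_singleton (d : String) : wmax [d] = d := by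
  simp [wmax, PySem.List.maxD, PySem.List.max?]

lemma wmax_append (g : List String) (h : g ≠ []) (d : String) :
    wmax (g ++ [d]) = if sev (wmax g) < sev d then d else wmax g := by
  have h1 := max?_eq_some_wmax g h
  have h2 : PySem.List.max? (g ++ [d]) sev =
      (if sev (wmax g) < sev d then some d else some (wmax g)) := by
    simp only [PySem.List.max?] at h1 ⊢
    rw [List.foldl_append, h1]
    simp
  have h3 : wmax (g ++ [d]) = (PySem.List.max? (g ++ [d]) sev).getD "scratch" := rfl
  rw [h3, h2]
  split_ifs <;> rfl

-- the invariant carried through the loop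
def LoopInv (seen : PySem.Dict String String) (groups : PySem.Dict String (List String)) : Prop :=
  seen.items = groups.items.map Fw ∧ groups.keys.Nodup ∧ ∀ p ∈ groups.items, p.2 ≠ []

lemma contains_eq_of_items (seen : PySem.Dict String String) (groups : PySem.Dict String (List String))
    (h : seen.items = groups.items.map Fw) (k : String) :
    seen.contains k = groups.contains k := by
  simp [PySem.Dict.contains, h, List.any_map, Function.comp_def, Fw]

lemma keys_eq_of_items (seen : PySem.Dict String String) (groups : PySem.Dict String (List String))
    (h : seen.items = groups.items.map Fw) :
    seen.keys = groups.keys := by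
  simp [PySem.Dict.keys, h, Fw]

lemma step_preserves (seen : PySem.Dict String String) (groups : PySem.Dict String (List String))
    (hinv : LoopInv seen groups) (m : List (String × String)) :
    LoopInv (stepA seen m) (stepB groups m) := by
  obtain ⟨hitems, hnodup, hne⟩ := hinv
  unfold stepA stepB
  cases hkey : m.lookup "panel_key" with
  | none => exact ⟨hitems, hnodup, hne⟩
  | some key =>
    by_cases hguard : key = "" ∨ key = "body_panel"
    · simp only [hguard, if_true]
      exact ⟨hitems, hnodup, hne⟩
    · simp only [hguard, if_false]
      generalize PySem.Str.strip (PySem.Str.lower ((m.lookup "damage_type").getD "scratch")) = dt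
      have hcont : seen.contains key = groups.contains key :=
        contains_eq_of_items seen groups hitems key
      by_cases hc : groups.contains key = true
      · -- key already grouped
        have hget : ∃ g, groups.get? key = some g := by
          rw [PySem.Dict.contains_eq_isSome_get?] at hc
          exact Option.isSome_iff_exists.mp hc
        obtain ⟨g, hg⟩ := hget
        have hmemg : (key, g) ∈ groups.items := PySem.Dict.mem_items_of_get?_eq_some groups hg
        have hgne : g ≠ [] := hne _ hmemg
        have hgetD : groups.getD key [] = g := PySem.Dict.getD_of_get?_eq_some groups [] hg
        have hseenNodup : seen.keys.Nodup := by
          rw [keys_eq_of_items seen groups hitems]; exact hnodup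
        have hmemF : (key, wmax g) ∈ seen.items := by
          rw [hitems]; exact List.mem_map_of_mem hmemg
        have hseenGetD : seen.getD key "" = wmax g :=
          PySem.Dict.getD_of_mem_items seen hmemF hseenNodup ""
        -- B's new group value
        have hmod : groups.modify key [] (· ++ [dt]) = groups.insert key (g ++ [dt]) := by
          simp [PySem.Dict.modify, hgetD]
        have hBitems : (groups.modify key [] (· ++ [dt])).items =
            groups.items.map (fun p => if p.1 == key then (key, g ++ [dt]) else p) := by
          rw [hmod, PySem.Dict.items_insert_of_contains groups _ hc]
        -- value uniqueness: any entry at key has value g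
        have hval : ∀ p ∈ groups.items, p.1 = key → p.2 = g := by
          intro p hp hpk
          have : groups.get? key = some p.2 := by
            refine (PySem.Dict.get?_eq_some_iff_mem_items groups key p.2 hnodup).mpr ?_
            rw [← hpk]; exact hp
          rw [hg] at this; exact (Option.some_inj.mp this).symm
        have hcont' : seen.contains key = true := hcont.trans hc
        by_cases hsev : sev dt > sev (wmax g)
        · -- A overwrites, wmax of the extended group is dt
          have hwm : wmax (g ++ [dt]) = dt := by
            rw [wmax_append g hgne dt, if_pos hsev]
          simp only [hcont', Bool.true_eq_false, false_or, hseenGetD]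
          rw [if_pos (by exact hsev)]
          refine ⟨?_, ?_, ?_⟩
          · rw [PySem.Dict.items_insert_of_contains seen _ hcont', hBitems, hitems,
              List.map_map, List.map_map]
            apply List.map_congr_left
            intro p hp
            by_cases hpk : p.1 = key
            · simp [Fw, hpk, hwm]
            · simp [Fw, hpk]
          · simp only [PySem.Dict.keys] at hnodup ⊢
            rw [hBitems, List.map_map]
            have heq : groups.items.map ((fun p => p.1) ∘ fun p => if p.1 == key then (key, g ++ [dt]) else p)
                = groups.items.map (fun p => p.1) := by
              apply List.map_congr_left
              intro p _
              by_cases hpk : p.1 = key <;> simp [Function.comp, hpk]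
            rw [heq]
            exact hnodup
          · intro p hp
            rw [hBitems] at hp
            obtain ⟨q, hq, hqe⟩ := List.mem_map.mp hp
            by_cases hqk : q.1 = key
            · simp only [hqk, beq_self_eq_true, if_true] at hqe
              rw [← hqe]; simp [hgne]
            · simp only [beq_iff_eq, hqk, if_false] at hqe
              rw [← hqe]; exact hne q hq
        · -- A keeps its entry, wmax of the extended group is unchanged
          have hwm : wmax (g ++ [dt]) = wmax g := by
            rw [wmax_append g hgne dt, if_neg (by exact hsev)]
          simp only [hcont', Bool.true_eq_false, false_or, hseenGetD]
          rw [if_neg (by exact hsev)]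
          refine ⟨?_, ?_, ?_⟩
          · rw [hBitems, hitems, List.map_map]
            apply List.map_congr_left
            intro p hp
            by_cases hpk : p.1 = key
            · have hpg : p.2 = g := hval p hp hpk
              simp [Fw, hpk, hwm, hpg]
            · simp [Fw, hpk]
          · simp only [PySem.Dict.keys] at hnodup ⊢
            rw [hBitems, List.map_map]
            have heq : groups.items.map ((fun p => p.1) ∘ fun p => if p.1 == key then (key, g ++ [dt]) else p)
                = groups.items.map (fun p => p.1) := by
              apply List.map_congr_left
              intro p _
              by_cases hpk : p.1 = key <;> simp [Function.comp, hpk]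
            rw [heq]
            exact hnodup
          · intro p hp
            rw [hBitems] at hp
            obtain ⟨q, hq, hqe⟩ := List.mem_map.mp hp
            by_cases hqk : q.1 = key
            · simp only [hqk, beq_self_eq_true, if_true] at hqe
              rw [← hqe]; simp [hgne]
            · simp only [beq_iff_eq, hqk, if_false] at hqe
              rw [← hqe]; exact hne q hq
      · -- fresh key: both append
        have hc' : groups.contains key = false := by
          cases h : groups.contains key with
          | false => rfl
          | true => exact absurd h hc
        have hcont' : seen.contains key = false := hcont.trans hc'
        have hgetD : groups.getD key [] = [] := PySem.Dict.getD_of_not_contains groups [] hc'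
        have hmod : groups.modify key [] (· ++ [dt]) = groups.insert key [dt] := by
          simp [PySem.Dict.modify, hgetD]
        simp only [hcont', gt_iff_lt, true_or, if_true]
        refine ⟨?_, ?_, ?_⟩
        · rw [PySem.Dict.items_insert_of_not_contains seen dt hcont', hmod,
            PySem.Dict.items_insert_of_not_contains groups [dt] hc', hitems, List.map_append]
          simp [Fw, wmax_singleton]
        · rw [hmod, PySem.Dict.keys_insert_of_not_contains groups [dt] hc', List.nodup_append]
          refine ⟨hnodup, List.nodup_singleton _, ?_⟩
          intro a ha b hbmem
          have hb' : b = key := by simpa using hbmem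
          subst hb'
          intro hak
          subst hak
          have := (PySem.Dict.contains_iff_mem_keys groups a).mpr ha
          rw [this] at hc'
          cases hc'
        · intro p hp
          rw [hmod, PySem.Dict.items_insert_of_not_contains groups [dt] hc'] at hp
          rcases List.mem_append.mp hp with h | h
          · exact hne p h
          · simp only [List.mem_singleton] at h
            subst h; simp

lemma fold_inv (l : List (List (String × String)))
    (seen : PySem.Dict String String) (groups : PySem.Dict String (List String))
    (hinv : LoopInv seen groups) :
    LoopInv (l.foldl stepA seen) (l.foldl stepB groups) := by
  induction l generalizing seen groups with
  | nil => exact hinv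
  | cons m t ih => exact ih _ _ (step_preserves seen groups hinv m)

-- ===== VERDICT (by name: the statement is the Claim_ definition above) =====
theorem build_damage_part_mapping_for_price_api_py_spec : Claim_equal_build_damage_part_mapping_for_price_api_py := by
  intro dpm _
  unfold Spec_build_damage_part_mapping_for_price_api_py
  unfold build_damage_part_mapping_for_price_api_py build_damage_part_mapping_for_price_api_py_alt
  have hinv : LoopInv (dpm.foldl stepA PySem.Dict.empty) (dpm.foldl stepB PySem.Dict.empty) :=
    fold_inv dpm _ _ ⟨rfl, by simp [PySem.Dict.keys, PySem.Dict.empty], by simp [PySem.Dict.empty]⟩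
  rw [hinv.1, List.map_map]
  apply List.map_congr_left
  intro p _
  rfl
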